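-- pv_equiv track=rewrite | github.com/HafsaOuaj/Graph | Graph_creation.py | transform_to_consecutive
-- ===== SOURCE A (Python) =====
-- def transform_to_consecutive(numbers):
--     result = [1]
--     current_number = numbers[0]
--     consecutive_count = 1
--     for num in numbers[1:]:
--         if num != current_number:
--             current_number = num
--             consecutive_count += 1
--             result.append(consecutive_count)
--         else:
--             # consecutive_count += 1
--             result.append(consecutive_count)
--         # result.append(consecutive_count)
--     return result
-- ===== SOURCE B (Python) =====
-- from itertools import accumulate
--
-- def transform_to_consecutive(numbers):
--     first = numbers[0]  # IndexError on empty input, same as A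
--     # pass 1: indicator of a value change at each position > 0
--     flags = [0 if a == b else 1 for a, b in zip(numbers[1:], numbers)]
--     # pass 2: prefix sum of the indicators, starting from group 1
--     return list(accumulate(flags, initial=1))
-- ===== Notes on version B (the rewrite author's own statement) =====
-- stated objective: alternative
-- what changed: Replaces A's fused stateful loop (tracking current value and running counter) by a two-pass decomposition: a change-indicator list built by zipping the list with its shift, then a prefix-sum scan (itertools.accumulate) over the indicators.
import Mathlib
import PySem

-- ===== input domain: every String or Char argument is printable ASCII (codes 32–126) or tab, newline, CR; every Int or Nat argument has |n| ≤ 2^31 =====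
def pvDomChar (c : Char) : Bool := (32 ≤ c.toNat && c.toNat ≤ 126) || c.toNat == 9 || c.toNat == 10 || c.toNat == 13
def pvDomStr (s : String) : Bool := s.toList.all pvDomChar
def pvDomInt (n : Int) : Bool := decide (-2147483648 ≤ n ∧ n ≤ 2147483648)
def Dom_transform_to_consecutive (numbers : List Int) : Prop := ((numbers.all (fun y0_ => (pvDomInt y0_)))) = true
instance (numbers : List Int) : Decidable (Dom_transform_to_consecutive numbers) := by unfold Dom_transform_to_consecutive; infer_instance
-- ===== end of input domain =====

-- B replaces A's fused stateful run-counting loop by a two-pass decomposition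
-- (change indicators from a zip, then a prefix-sum scan); return value only, no speed claim.


-- ===== PORT A =====
def transform_to_consecutive (numbers : List Int) : List Int :=
  match PySem.List.pyGet? numbers 0 with   -- numbers[0]: IndexError on [] (excluded by Pre_)
  | none => []
  | some c0 =>
    ((PySem.List.slice numbers (some 1) none).foldl
      (fun (st : List Int × Int × Int) num =>
        if num ≠ st.2.1 then (st.1 ++ [st.2.2 + 1], num, st.2.2 + 1)
        else (st.1 ++ [st.2.2], st.2.1, st.2.2)) ([1], c0, 1)).1

-- ===== PORT B =====
def transform_to_consecutive_alt (numbers : List Int) : List Int :=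
  match PySem.List.pyGet? numbers 0 with   -- numbers[0]: IndexError on [] (excluded by Pre_)
  | none => []
  | some _ =>
    let flags := (List.zip (PySem.List.slice numbers (some 1) none) numbers).map
        (fun p => if p.1 == p.2 then (0 : Int) else 1)
    -- itertools.accumulate(flags, initial=1): a scan keeping (output so far, running sum)
    (flags.foldl (fun (st : List Int × Int) f => (st.1 ++ [st.2 + f], st.2 + f)) ([1], 1)).1

-- ===== PRECONDITION & SPEC =====
-- Pre_ excludes exactly the empty list, on which both Pythons raise IndexError at numbers[0].
def Pre_transform_to_consecutive (numbers : List Int) : Prop := numbers ≠ []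
instance (numbers : List Int) : Decidable (Pre_transform_to_consecutive numbers) := by unfold Pre_transform_to_consecutive; infer_instance
def pvWitness_transform_to_consecutive : List Int := [2, 2, 5]

def Spec_transform_to_consecutive (numbers : List Int) (out : List Int) : Prop := out = transform_to_consecutive_alt numbers
instance (numbers : List Int) (out : List Int) : Decidable (Spec_transform_to_consecutive numbers out) := by unfold Spec_transform_to_consecutive; infer_instance

-- ===== CLAIM (what is proved, stated in full; the proofs are below) =====
def Claim_equal_transform_to_consecutive : Prop := ∀ (numbers : List Int), Dom_transform_to_consecutive numbers → Pre_transform_to_consecutive numbers → Spec_transform_to_consecutive numbers (transform_to_consecutive numbers)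

-- ===== LEMMAS AND PROOFS =====

/-- Core invariant: A's fused loop over the tail `t`, started with current value `cur`,
counter `cnt` and accumulated result `res`, produces the same list as B's prefix-sum
scan over the change indicators of `t` against `cur :: t`, started from `(res, cnt)`. -/
lemma loop_eq (t : List Int) : ∀ (cur cnt : Int) (res : List Int),
    (t.foldl (fun (st : List Int × Int × Int) num =>
        if num ≠ st.2.1 then (st.1 ++ [st.2.2 + 1], num, st.2.2 + 1)
        else (st.1 ++ [st.2.2], st.2.1, st.2.2)) (res, cur, cnt)).1
      = (((List.zip t (cur :: t)).map (fun p => if p.1 == p.2 then (0 : Int) else 1)).foldl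
          (fun (st : List Int × Int) f => (st.1 ++ [st.2 + f], st.2 + f)) (res, cnt)).1 := by
  induction t with
  | nil => intro cur cnt res; simp
  | cons n t' ih =>
    intro cur cnt res
    simp only [List.zip_cons_cons, List.map_cons, List.foldl_cons]
    by_cases hne : n = cur
    · subst hne
      rw [if_neg (by simp), if_pos (by simp)]
      simpa using ih n cnt (res ++ [cnt + 0])
    · rw [if_pos hne, if_neg (by simpa using hne)]
      exact ih n (cnt + 1) (res ++ [cnt + 1])

-- ===== VERDICT (by name: the statement is the Claim_ definition above) =====
theorem transform_to_consecutive_spec : Claim_equal_transform_to_consecutive := by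
  intro numbers _ hpre
  unfold Spec_transform_to_consecutive
  match numbers, hpre with
  | x :: t, _ =>
    unfold transform_to_consecutive transform_to_consecutive_alt
    simp only [PySem.List.pyGet?_zero_cons, PySem.List.slice_from_one, List.tail_cons]
    exact loop_eq t x 1 [1]
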